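-- pv_equiv track=rewrite | github.com/lavanyasharma65017/Sparkminds-EVISCAN | key_characters_analyzer.py | _find_contact_key
-- ===== SOURCE A (Python) =====
-- from typing import Dict, List, Any, Tuple
--
-- def _find_contact_key(phone_or_name: str, contacts: List[Dict]) -> str:
--     """Find contact key (name or phone) from phone number or name."""
--     if not phone_or_name:
--         return None
--
--     # First try to find by phone
--     for contact in contacts:
--         if isinstance(contact, dict):
--             if contact.get('phone') == phone_or_name:
--                 name = contact.get('name', '')
--                 return name if name and name != 'Unknown' else phone_or_name
--
--     # Try to find by name
--     for contact in contacts: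
--         if isinstance(contact, dict):
--             if contact.get('name') == phone_or_name:
--                 return phone_or_name
--
--     # If not found, use the phone/name as-is
--     return phone_or_name
-- ===== SOURCE B (Python) =====
-- def _find_contact_key(phone_or_name, contacts):
--     """Fold back-to-front: start from the default answer and let each earlier
--     phone match overwrite it, so the first (leftmost) phone match wins."""
--     if not phone_or_name:
--         return None
--     result = phone_or_name
--     for contact in reversed(contacts):
--         if isinstance(contact, dict) and contact.get('phone') == phone_or_name:
--             name = contact.get('name', '')
--             result = name if name and name != 'Unknown' else phone_or_name
--     return result
-- ===== Notes on version B (the rewrite author's own statement) =====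
-- stated objective: alternative
-- what changed: Replaces A's two forward scans with early return (the second, name scan is behaviourally inert) by a single reversed-order fold with an accumulator: start from the default answer and let each earlier phone match overwrite it, so the leftmost match wins without any early exit.
import Mathlib
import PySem

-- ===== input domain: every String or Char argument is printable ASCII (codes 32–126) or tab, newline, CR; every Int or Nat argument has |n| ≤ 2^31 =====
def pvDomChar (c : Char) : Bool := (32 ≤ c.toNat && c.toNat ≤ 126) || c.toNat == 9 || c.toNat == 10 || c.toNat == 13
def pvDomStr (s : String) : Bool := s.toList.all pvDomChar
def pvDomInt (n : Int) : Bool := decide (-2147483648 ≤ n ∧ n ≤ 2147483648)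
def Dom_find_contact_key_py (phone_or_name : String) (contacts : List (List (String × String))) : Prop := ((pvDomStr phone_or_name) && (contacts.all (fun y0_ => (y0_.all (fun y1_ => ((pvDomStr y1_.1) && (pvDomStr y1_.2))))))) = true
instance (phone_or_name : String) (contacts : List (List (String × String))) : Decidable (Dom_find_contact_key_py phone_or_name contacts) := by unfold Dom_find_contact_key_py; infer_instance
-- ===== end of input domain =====

-- B replaces A's two forward scans (the second is inert) by one reversed-order fold whose accumulator
-- is overwritten by each earlier phone match, so the leftmost match wins; return value only.

-- ===== PORT A =====
-- first loop: return the name-or-query value at the first phone match, none if no match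
def pvA_phoneLoop (phone_or_name : String) : List (List (String × String)) → Option String
  | [] => none
  | c :: rest =>
      if (PySem.Dict.mk c).get? "phone" = some phone_or_name then
        let name := (PySem.Dict.mk c).getD "name" ""
        some (if name ≠ "" ∧ name ≠ "Unknown" then name else phone_or_name)
      else pvA_phoneLoop phone_or_name rest

-- second loop: return phone_or_name at the first name match, else fall through to phone_or_name
def pvA_nameLoop (phone_or_name : String) : List (List (String × String)) → Option String
  | [] => some phone_or_name
  | c :: rest =>
      if (PySem.Dict.mk c).get? "name" = some phone_or_name then some phone_or_name
      else pvA_nameLoop phone_or_name rest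

def find_contact_key_py (phone_or_name : String) (contacts : List (List (String × String))) : Option String :=
  if phone_or_name = "" then none
  else
    match pvA_phoneLoop phone_or_name contacts with
    | some r => some r
    | none => pvA_nameLoop phone_or_name contacts

-- ===== PORT B =====
-- Source B's loop body: overwrite the accumulator on a phone match
def pvB_step (phone_or_name : String) (acc : String) (c : List (String × String)) : String :=
  if (PySem.Dict.mk c).get? "phone" = some phone_or_name then
    let name := (PySem.Dict.mk c).getD "name" ""
    (if name ≠ "" ∧ name ≠ "Unknown" then name else phone_or_name)
  else acc

def find_contact_key_py_alt (phone_or_name : String) (contacts : List (List (String × String))) : Option String :=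
  if phone_or_name = "" then none
  else some (contacts.reverse.foldl (pvB_step phone_or_name) phone_or_name)

-- ===== PRECONDITION & SPEC =====
def Spec_find_contact_key_py (phone_or_name : String) (contacts : List (List (String × String))) (out : Option String) : Prop := out = find_contact_key_py_alt phone_or_name contacts
instance (phone_or_name : String) (contacts : List (List (String × String))) (out : Option String) : Decidable (Spec_find_contact_key_py phone_or_name contacts out) := by unfold Spec_find_contact_key_py; infer_instance

-- ===== CLAIM (what is proved, stated in full; the proofs are below) =====
def Claim_equal_find_contact_key_py : Prop := ∀ (phone_or_name : String) (contacts : List (List (String × String))), Dom_find_contact_key_py phone_or_name contacts → Spec_find_contact_key_py phone_or_name contacts (find_contact_key_py phone_or_name contacts)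

-- ===== LEMMAS AND PROOFS =====
theorem pvA_nameLoop_eq (p : String) (cs : List (List (String × String))) :
    pvA_nameLoop p cs = some p := by
  induction cs with
  | nil => rfl
  | cons c rest ih => simp [pvA_nameLoop, ih]

-- the reversed foldl is a foldr; the first (leftmost) phone match determines the result
theorem pvB_foldr_eq (p : String) (cs : List (List (String × String))) :
    cs.foldr (fun c acc => pvB_step p acc c) p =
      (match pvA_phoneLoop p cs with | some r => r | none => p) := by
  induction cs with
  | nil => rfl
  | cons c rest ih =>
      by_cases h : (PySem.Dict.mk c).get? "phone" = some p
      · simp [pvA_phoneLoop, pvB_step, h]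
      · have hA : pvA_phoneLoop p (c :: rest) = pvA_phoneLoop p rest := by
          rw [pvA_phoneLoop]; simp [h]
        rw [List.foldr_cons, hA, ← ih]
        simp only [pvB_step, if_neg h]

-- ===== VERDICT (by name: the statement is the Claim_ definition above) =====
theorem find_contact_key_py_spec : Claim_equal_find_contact_key_py := by
  intro p cs _
  unfold Spec_find_contact_key_py find_contact_key_py find_contact_key_py_alt
  by_cases hp : p = ""
  · simp [hp]
  · simp only [if_neg hp]
    rw [List.foldl_reverse, pvB_foldr_eq]
    cases h : pvA_phoneLoop p cs with
    | some r => simp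
    | none => simp [pvA_nameLoop_eq]
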